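-- pv_equiv track=rewrite | github.com/eswarchalla9642/HackerEarthSolutions | Divide Number.py | solve
-- ===== SOURCE A (Python) =====
-- def solve(N):
--     ans = -1
--     factors = []
--     simplified = [2, 3, 4, 5, 6, 7, 8, 9, 10, 12, 15, 18, 20, 24, 42]
--     if N % 2 != 0:
--         return ans
--     for i in range(15):
--         if N % simplified[i] == 0:
--             factors.append(N // simplified[i])
--     for a in range(len(factors)):
--         for b in range(len(factors)):
--             for c in range(len(factors)):
--                 for d in range(len(factors)):
--                     if factors[a] + factors[b] + factors[c] + factors[d] == N:
--                         if factors[a] * factors[b] * factors[c] * factors[d] > ans: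
--                             ans = factors[a] * factors[b] * factors[c] * factors[d]
--     return ans
-- ===== SOURCE B (Python) =====
-- def solve(N):
--     if N % 2 != 0:
--         return -1
--     divs = [2, 3, 4, 5, 6, 7, 8, 9, 10, 12, 15, 18, 20, 24, 42]
--     factors = [N // d for d in divs if N % d == 0]
--     buckets = {}
--     for x in factors:
--         for y in factors:
--             buckets.setdefault(x + y, []).append(x * y)
--     ans = -1
--     for s, ps in buckets.items():
--         qs = buckets.get(N - s)
--         if qs is not None:
--             for p in ps:
--                 for q in qs:
--                     if p * q > ans:
--                         ans = p * q
--     return ans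
-- ===== Notes on version B (the rewrite author's own statement) =====
-- stated objective: alternative
-- what changed: A scans all ordered quadruples of factors (four nested index loops); B groups pair products in a dict keyed by pair sum and only combines each bucket with the bucket of the complementary sum N-s, skipping every pair sum whose complement never occurs.
import Mathlib
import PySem

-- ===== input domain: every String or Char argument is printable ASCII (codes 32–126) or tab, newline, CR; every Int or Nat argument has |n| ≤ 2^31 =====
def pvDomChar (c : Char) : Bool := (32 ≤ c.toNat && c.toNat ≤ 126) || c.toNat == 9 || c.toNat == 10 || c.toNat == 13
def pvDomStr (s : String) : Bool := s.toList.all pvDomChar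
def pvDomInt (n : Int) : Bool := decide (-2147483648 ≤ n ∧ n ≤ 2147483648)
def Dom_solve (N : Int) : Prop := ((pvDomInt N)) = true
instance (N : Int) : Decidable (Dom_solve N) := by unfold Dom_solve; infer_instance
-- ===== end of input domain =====

-- B replaces A's brute-force scan over all ordered quadruples of factors by a meet-in-the-middle
-- pass: pair products are grouped in a dict keyed by pair sum, and only buckets whose complementary
-- sum N-s is present are combined (objective: alternative; return value only, no mutation involved).

-- ===== PORT A =====
def solve (N : Int) : Int :=
  let ans : Int := -1
  let simplified : List Int := [2, 3, 4, 5, 6, 7, 8, 9, 10, 12, 15, 18, 20, 24, 42]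
  if PySem.Int.mod N 2 ≠ 0 then ans
  else
    let factors : List Int :=
      (PySem.List.pyRange 0 15).foldl (fun fs i =>
        if PySem.Int.mod N (PySem.List.pyGetD simplified i 0) = 0 then
          fs ++ [PySem.Int.floordiv N (PySem.List.pyGetD simplified i 0)]
        else fs) []
    (PySem.List.pyRange 0 (PySem.List.len factors)).foldl (fun ans a =>
      (PySem.List.pyRange 0 (PySem.List.len factors)).foldl (fun ans b =>
        (PySem.List.pyRange 0 (PySem.List.len factors)).foldl (fun ans c =>
          (PySem.List.pyRange 0 (PySem.List.len factors)).foldl (fun ans d =>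
            if PySem.List.pyGetD factors a 0 + PySem.List.pyGetD factors b 0 +
                 PySem.List.pyGetD factors c 0 + PySem.List.pyGetD factors d 0 = N then
              if PySem.List.pyGetD factors a 0 * PySem.List.pyGetD factors b 0 *
                   PySem.List.pyGetD factors c 0 * PySem.List.pyGetD factors d 0 > ans then
                PySem.List.pyGetD factors a 0 * PySem.List.pyGetD factors b 0 *
                  PySem.List.pyGetD factors c 0 * PySem.List.pyGetD factors d 0
              else ans
            else ans) ans) ans) ans) ans

-- ===== PORT B =====
def solve_alt (N : Int) : Int :=
  if PySem.Int.mod N 2 ≠ 0 then -1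
  else
    let divs : List Int := [2, 3, 4, 5, 6, 7, 8, 9, 10, 12, 15, 18, 20, 24, 42]
    let factors : List Int :=
      divs.filterMap (fun d =>
        if PySem.Int.mod N d = 0 then some (PySem.Int.floordiv N d) else none)
    let buckets : PySem.Dict Int (List Int) :=
      factors.foldl (fun bk x =>
        factors.foldl (fun bk y =>
          bk.modify (x + y) [] (fun l => l ++ [x * y])) bk) PySem.Dict.empty
    buckets.items.foldl (fun ans sp =>
      match buckets.get? (N - sp.1) with
      | none => ans
      | some qs =>
          sp.2.foldl (fun ans p =>
            qs.foldl (fun ans q => if p * q > ans then p * q else ans) ans) ans) (-1)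

-- ===== PRECONDITION & SPEC =====
def Spec_solve (N : Int) (out : Int) : Prop := out = solve_alt N
instance (N : Int) (out : Int) : Decidable (Spec_solve N out) := by unfold Spec_solve; infer_instance

-- ===== CLAIM (what is proved, stated in full; the proofs are below) =====
def Claim_equal_solve : Prop := ∀ (N : Int), Dom_solve N → Spec_solve N (solve N)

-- ===== LEMMAS AND PROOFS =====

-- the factors list both programs compute, and the (pair-sum, pair-product) list
def pvFct (N : Int) : List Int :=
  ([2, 3, 4, 5, 6, 7, 8, 9, 10, 12, 15, 18, 20, 24, 42] : List Int).filterMap (fun d =>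
    if PySem.Int.mod N d = 0 then some (PySem.Int.floordiv N d) else none)

def pvPrs (N : Int) : List (Int × Int) :=
  (pvFct N).flatMap (fun x => (pvFct N).map (fun y => (x + y, x * y)))

def pvBkt (N : Int) : PySem.Dict Int (List Int) :=
  (pvPrs N).foldl (fun d p => d.modify p.1 [] (fun l => l ++ [p.2])) PySem.Dict.empty

-- contribution lists: the candidate products each program's max-accumulating loop sees
def pvLA (N : Int) : List Int :=
  (pvPrs N).flatMap (fun p =>
    (pvPrs N).filterMap (fun q => if p.1 + q.1 = N then some (p.2 * q.2) else none))

def pvItem (N : Int) (sp : Int × List Int) : List Int :=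
  match (pvBkt N).get? (N - sp.1) with
  | none => []
  | some qs => sp.2.flatMap (fun p => qs.map (fun q => p * q))

def pvLB (N : Int) : List Int := (pvBkt N).items.flatMap (pvItem N)

-- "if v > a then v else a" is max
theorem pv_ifgt_eq_max (a v : Int) : (if a < v then v else a) = max a v := by
  rw [max_def]; split_ifs <;> omega

-- a conditional max-accumulating fold is a plain max-fold over the filtered values
theorem pv_foldl_ifmax {α : Type} (c : α → Prop) [DecidablePred c] (v : α → Int)
    (L : List α) (i : Int) :
    L.foldl (fun a q => if c q then max a (v q) else a) i
      = (L.filterMap (fun q => if c q then some (v q) else none)).foldl max i := by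
  induction L generalizing i with
  | nil => rfl
  | cons x xs ih => by_cases h : c x <;> simp [h, ih]

theorem pv_foldl_max_le {t : List Int} {i m : Int} (h : i ≤ m) (h2 : ∀ y ∈ t, y ≤ m) :
    t.foldl max i ≤ m := by
  induction t generalizing i with
  | nil => exact h
  | cons x xs ih =>
      exact ih (max_le h (h2 x (by simp))) (fun y hy => h2 y (by simp [hy]))

theorem pv_foldl_max_eq_of_mem_iff (i : Int) (L1 L2 : List Int)
    (h : ∀ v, v ∈ L1 ↔ v ∈ L2) : L1.foldl max i = L2.foldl max i := by
  have b1 := PySem.List.le_foldl_max L1 i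
  have b2 := PySem.List.le_foldl_max L2 i
  exact le_antisymm
    (pv_foldl_max_le b2.1 (fun y hy => b2.2 y ((h y).mp hy)))
    (pv_foldl_max_le b1.1 (fun y hy => b1.2 y ((h y).mpr hy)))

-- a double loop over factors consuming (x+y, x*y) is a single loop over pvPrs
theorem pv_pairize {β : Type} (F : List Int) (g : β → Int × Int → β) (b0 : β) :
    F.foldl (fun b x => F.foldl (fun b y => g b (x + y, x * y)) b) b0
      = (F.flatMap (fun x => F.map (fun y => (x + y, x * y)))).foldl g b0 := by
  rw [List.foldl_flatMap]; simp only [List.foldl_map]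

-- A's append loop over the divisor table builds pvFct
theorem pv_factorsA (N : Int) (ds : List Int) (acc : List Int) :
    ds.foldl (fun fs d =>
        if PySem.Int.mod N d = 0 then fs ++ [PySem.Int.floordiv N d] else fs) acc
      = acc ++ ds.filterMap (fun d =>
          if PySem.Int.mod N d = 0 then some (PySem.Int.floordiv N d) else none) := by
  induction ds generalizing acc with
  | nil => simp
  | cons d ds ih => by_cases h : PySem.Int.mod N d = 0 <;> simp [h, ih]

-- the four index loops of A, converted level by level to loops over the factor list
theorem pv_inner (F : List Int) (N u v w a0 : Int) :
    (PySem.List.pyRange 0 (PySem.List.len F)).foldl (fun ans d =>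
        if u + v + w + PySem.List.pyGetD F d 0 = N then
          max ans (u * v * w * PySem.List.pyGetD F d 0)
        else ans) a0
      = F.foldl (fun ans z => if u + v + w + z = N then max ans (u * v * w * z) else ans) a0 := by
  have h := PySem.List.foldl_pyRange_pyGetD (a := 0) F 0
    (fun ans z => if u + v + w + z = N then max ans (u * v * w * z) else ans)
    a0 (le_refl 0)
  simpa using h

theorem pv_l3 (F : List Int) (N u v a0 : Int) :
    (PySem.List.pyRange 0 (PySem.List.len F)).foldl (fun ans c =>
        F.foldl (fun ans z =>
          if u + v + PySem.List.pyGetD F c 0 + z = N then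
            max ans (u * v * PySem.List.pyGetD F c 0 * z)
          else ans) ans) a0
      = F.foldl (fun ans w =>
          F.foldl (fun ans z => if u + v + w + z = N then max ans (u * v * w * z) else ans) ans) a0 := by
  have h := PySem.List.foldl_pyRange_pyGetD (a := 0) F 0
    (fun ans w => F.foldl (fun ans z => if u + v + w + z = N then max ans (u * v * w * z) else ans) ans)
    a0 (le_refl 0)
  simpa using h

theorem pv_l2 (F : List Int) (N u a0 : Int) :
    (PySem.List.pyRange 0 (PySem.List.len F)).foldl (fun ans b =>
        F.foldl (fun ans w =>
          F.foldl (fun ans z =>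
            if u + PySem.List.pyGetD F b 0 + w + z = N then
              max ans (u * PySem.List.pyGetD F b 0 * w * z)
            else ans) ans) ans) a0
      = F.foldl (fun ans y =>
          F.foldl (fun ans w =>
            F.foldl (fun ans z => if u + y + w + z = N then max ans (u * y * w * z) else ans) ans) ans) a0 := by
  have h := PySem.List.foldl_pyRange_pyGetD (a := 0) F 0
    (fun ans y => F.foldl (fun ans w =>
      F.foldl (fun ans z => if u + y + w + z = N then max ans (u * y * w * z) else ans) ans) ans)
    a0 (le_refl 0)
  simpa using h

theorem pv_l1 (F : List Int) (N a0 : Int) :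
    (PySem.List.pyRange 0 (PySem.List.len F)).foldl (fun ans a =>
        F.foldl (fun ans y =>
          F.foldl (fun ans w =>
            F.foldl (fun ans z =>
              if PySem.List.pyGetD F a 0 + y + w + z = N then
                max ans (PySem.List.pyGetD F a 0 * y * w * z)
              else ans) ans) ans) ans) a0
      = F.foldl (fun ans x =>
          F.foldl (fun ans y =>
            F.foldl (fun ans w =>
              F.foldl (fun ans z => if x + y + w + z = N then max ans (x * y * w * z) else ans) ans) ans) ans) a0 := by
  have h := PySem.List.foldl_pyRange_pyGetD (a := 0) F 0
    (fun ans x => F.foldl (fun ans y => F.foldl (fun ans w =>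
      F.foldl (fun ans z => if x + y + w + z = N then max ans (x * y * w * z) else ans) ans) ans) ans)
    a0 (le_refl 0)
  simpa using h

-- grouping the two inner and the two outer loops into loops over pair (sum, product) values
theorem pv_pair2 (N : Int) (x y a0 : Int) :
    (pvFct N).foldl (fun ans z =>
        (pvFct N).foldl (fun ans w =>
          if x + y + (z + w) = N then max ans (x * y * (z * w)) else ans) ans) a0
      = (pvPrs N).foldl (fun ans q =>
          if x + y + q.1 = N then max ans (x * y * q.2) else ans) a0 := by
  simpa [pvPrs] using pv_pairize (pvFct N)
    (fun ans q => if x + y + q.1 = N then max ans (x * y * q.2) else ans) a0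

theorem pv_pair1 (N : Int) (a0 : Int) :
    (pvFct N).foldl (fun ans x =>
        (pvFct N).foldl (fun ans y =>
          (pvPrs N).foldl (fun ans q =>
            if x + y + q.1 = N then max ans (x * y * q.2) else ans) ans) ans) a0
      = (pvPrs N).foldl (fun ans p =>
          (pvPrs N).foldl (fun ans q =>
            if p.1 + q.1 = N then max ans (p.2 * q.2) else ans) ans) a0 := by
  simpa [pvPrs] using pv_pairize (pvFct N)
    (fun ans p => (pvPrs N).foldl (fun ans q =>
      if p.1 + q.1 = N then max ans (p.2 * q.2) else ans) ans) a0

theorem pv_regroup_add (a b c d : Int) : a + b + c + d = a + b + (c + d) := by ring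
theorem pv_regroup_mul (a b c d : Int) : a * b * c * d = a * b * (c * d) := by ring

theorem pv_quad_to_LA (N : Int) :
    (pvPrs N).foldl (fun ans p =>
        (pvPrs N).foldl (fun ans q =>
          if p.1 + q.1 = N then max ans (p.2 * q.2) else ans) ans) (-1)
      = (pvLA N).foldl max (-1) := by
  unfold pvLA
  rw [List.foldl_flatMap]
  simp only [pv_foldl_ifmax]

theorem pv_solve_eq (N : Int) (h : PySem.Int.mod N 2 = 0) :
    solve N = (pvLA N).foldl max (-1) := by
  have hfac :
      (PySem.List.pyRange 0 15).foldl (fun fs i =>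
          if PySem.Int.mod N (PySem.List.pyGetD ([2, 3, 4, 5, 6, 7, 8, 9, 10, 12, 15, 18, 20, 24, 42] : List Int) i 0) = 0 then
            fs ++ [PySem.Int.floordiv N (PySem.List.pyGetD ([2, 3, 4, 5, 6, 7, 8, 9, 10, 12, 15, 18, 20, 24, 42] : List Int) i 0)]
          else fs) []
        = pvFct N := by
    have h1 := PySem.List.foldl_pyRange_pyGetD (a := 0)
      ([2, 3, 4, 5, 6, 7, 8, 9, 10, 12, 15, 18, 20, 24, 42] : List Int) 0
      (fun fs d => if PySem.Int.mod N d = 0 then fs ++ [PySem.Int.floordiv N d] else fs) [] (le_refl 0)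
    simp only [show PySem.List.len ([2, 3, 4, 5, 6, 7, 8, 9, 10, 12, 15, 18, 20, 24, 42] : List Int)
      = (15 : Int) from by decide] at h1
    simpa only [pv_factorsA, Int.toNat_zero, List.drop_zero, List.nil_append, pvFct] using h1
  simp only [solve]
  rw [if_neg (not_not_intro h), hfac]
  simp only [pv_ifgt_eq_max]
  simp only [pv_inner]
  simp only [pv_l3]
  simp only [pv_l2]
  simp only [pv_l1]
  simp only [pv_regroup_add, pv_regroup_mul]
  simp only [pv_pair2]
  simp only [pv_pair1]
  exact pv_quad_to_LA N

-- B-side: the bucket dict built by B's double loop is pvBkt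
theorem pv_bkt_eq (N : Int) :
    (pvFct N).foldl (fun bk x =>
        (pvFct N).foldl (fun bk y =>
          bk.modify (x + y) [] (fun l => l ++ [x * y])) bk) PySem.Dict.empty
      = pvBkt N := by
  simpa [pvBkt, pvPrs] using pv_pairize (pvFct N)
    (fun (bk : PySem.Dict Int (List Int)) p => bk.modify p.1 [] (fun l => l ++ [p.2]))
    PySem.Dict.empty

theorem pv_itemfold (N : Int) (ans : Int) (sp : Int × List Int) :
    (match (pvBkt N).get? (N - sp.1) with
      | none => ans
      | some qs =>
          sp.2.foldl (fun ans p =>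
            qs.foldl (fun ans q => if ans < p * q then p * q else ans) ans) ans)
      = (pvItem N sp).foldl max ans := by
  unfold pvItem
  cases hq : (pvBkt N).get? (N - sp.1) with
  | none => rfl
  | some qs =>
      simp only [List.foldl_flatMap, List.foldl_map, pv_ifgt_eq_max]

theorem pv_alt_eq (N : Int) (h : PySem.Int.mod N 2 = 0) :
    solve_alt N = (pvLB N).foldl max (-1) := by
  simp only [solve_alt]
  rw [if_neg (not_not_intro h)]
  have hfb : ([2, 3, 4, 5, 6, 7, 8, 9, 10, 12, 15, 18, 20, 24, 42] : List Int).filterMap (fun d =>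
      if PySem.Int.mod N d = 0 then some (PySem.Int.floordiv N d) else none) = pvFct N := rfl
  rw [hfb, pv_bkt_eq]
  simp only [pv_itemfold]
  rw [pvLB, List.foldl_flatMap]

-- dict facts about pvBkt
theorem pv_bkt_getD (N s : Int) :
    (pvBkt N).getD s [] = ((pvPrs N).filter (fun p => p.1 == s)).map (fun x => x.2) := by
  simpa [pvBkt] using PySem.Dict.getD_foldl_modify_append (pvPrs N) PySem.Dict.empty s

theorem pv_bkt_keys_nodup (N : Int) : (pvBkt N).keys.Nodup := by
  unfold pvBkt
  exact PySem.Dict.nodup_keys_foldl_modify_key (pvPrs N) (fun p => p.1) []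
    (fun d p => fun l => l ++ [p.2]) PySem.Dict.empty
    (by simp [PySem.Dict.keys_empty])

theorem pv_bkt_mem_keys (N s : Int) :
    s ∈ (pvBkt N).keys ↔ ∃ p ∈ pvPrs N, p.1 = s := by
  have hk := PySem.Dict.keys_foldl_modify_key (pvPrs N) (fun p => p.1) []
    (fun d p => fun l => l ++ [p.2]) PySem.Dict.empty
  unfold pvBkt
  rw [hk]
  simp [PySem.Set.mem_update, PySem.Dict.keys_empty, List.mem_map]

theorem pv_bkt_mem_getD (N s x : Int) :
    x ∈ (pvBkt N).getD s [] ↔ ∃ p ∈ pvPrs N, p.1 = s ∧ p.2 = x := by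
  rw [pv_bkt_getD]
  simp only [List.mem_map, List.mem_filter, beq_iff_eq]
  tauto

theorem pv_bkt_get?_of_mem (N k : Int) (hk : k ∈ (pvBkt N).keys) :
    (pvBkt N).get? k = some ((pvBkt N).getD k []) := by
  have hne : (pvBkt N).get? k ≠ none := by
    intro hn
    rw [PySem.Dict.get?_eq_none_iff_not_mem_keys] at hn
    exact hn hk
  obtain ⟨v, hv⟩ := Option.ne_none_iff_exists'.mp hne
  rw [hv, PySem.Dict.getD_of_get?_eq_some _ [] hv]

theorem pv_mem_iff (N : Int) (v : Int) : v ∈ pvLA N ↔ v ∈ pvLB N := by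
  constructor
  · intro hv
    simp only [pvLA, List.mem_flatMap, List.mem_filterMap] at hv
    obtain ⟨p, hp, q, hq, hifq⟩ := hv
    by_cases hc : p.1 + q.1 = N
    · simp only [hc, if_pos, Option.some.injEq] at hifq
      simp only [pvLB, List.mem_flatMap]
      have hpk : p.1 ∈ (pvBkt N).keys := (pv_bkt_mem_keys N p.1).mpr ⟨p, hp, rfl⟩
      have hqk : q.1 ∈ (pvBkt N).keys := (pv_bkt_mem_keys N q.1).mpr ⟨q, hq, rfl⟩
      refine ⟨(p.1, (pvBkt N).getD p.1 []), ?_, ?_⟩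
      · rw [PySem.Dict.items_eq_map_keys _ (pv_bkt_keys_nodup N) []]
        exact List.mem_map_of_mem hpk
      · unfold pvItem
        have hNs : N - p.1 = q.1 := by omega
        rw [hNs, pv_bkt_get?_of_mem N q.1 hqk]
        simp only [List.mem_flatMap, List.mem_map]
        exact ⟨p.2, (pv_bkt_mem_getD N p.1 p.2).mpr ⟨p, hp, rfl, rfl⟩,
               q.2, (pv_bkt_mem_getD N q.1 q.2).mpr ⟨q, hq, rfl, rfl⟩, hifq⟩
    · simp [hc] at hifq
  · intro hv
    simp only [pvLB, List.mem_flatMap] at hv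
    obtain ⟨sp, hsp, hv⟩ := hv
    rw [PySem.Dict.items_eq_map_keys _ (pv_bkt_keys_nodup N) []] at hsp
    obtain ⟨k, hk, rfl⟩ := List.mem_map.mp hsp
    unfold pvItem at hv
    cases hq : (pvBkt N).get? (N - k) with
    | none => rw [hq] at hv; simp at hv
    | some qs =>
        rw [hq] at hv
        have hqsk : N - k ∈ (pvBkt N).keys := by
          by_contra hnk
          rw [← PySem.Dict.get?_eq_none_iff_not_mem_keys] at hnk
          rw [hq] at hnk; simp at hnk
        have hqs : qs = (pvBkt N).getD (N - k) [] :=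
          (PySem.Dict.getD_of_get?_eq_some _ [] hq).symm
        simp only [List.mem_flatMap, List.mem_map] at hv
        obtain ⟨a, ha, b, hb, hab⟩ := hv
        obtain ⟨p, hp, hp1, hp2⟩ := (pv_bkt_mem_getD N k a).mp ha
        obtain ⟨q, hq', hq1, hq2⟩ := (pv_bkt_mem_getD N (N - k) b).mp (hqs ▸ hb)
        simp only [pvLA, List.mem_flatMap, List.mem_filterMap]
        refine ⟨p, hp, q, hq', ?_⟩
        rw [if_pos (by omega), hp2, hq2, hab]

-- ===== VERDICT (by name: the statement is the Claim_ definition above) =====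
theorem solve_spec : Claim_equal_solve := by
  intro N _
  unfold Spec_solve
  by_cases h : PySem.Int.mod N 2 = 0
  · rw [pv_solve_eq N h, pv_alt_eq N h]
    exact pv_foldl_max_eq_of_mem_iff _ _ _ (pv_mem_iff N)
  · have h1 : N % 2 = 1 := by
      have h2 : PySem.Int.mod N 2 = N % 2 :=
        PySem.Int.mod_eq_emod_of_pos (by norm_num)
      have h3 := Int.emod_two_eq N
      omega
    simp [solve, solve_alt, h1]
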